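-- pv_equiv track=rewrite | github.com/jimmy-academia/dev-ADDM | scripts/debug/test_amos_accuracy.py | select_balanced_sample
-- ===== SOURCE A (Python) =====
-- def select_balanced_sample(gt_data: dict, n_critical: int = 3, n_high: int = 2, n_low: int = 5) -> list:
--     """Select balanced sample from ground truth."""
--     critical = []
--     high = []
--     low = []
--
--     for biz_id, data in gt_data.get("restaurants", {}).items():
--         verdict = data.get("ground_truth", {}).get("verdict", "Low Risk")
--         if verdict == "Critical Risk":
--             critical.append(biz_id)
--         elif verdict == "High Risk":
--             high.append(biz_id)
--         else:
--             low.append(biz_id)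
--
--     # Select samples
--     sample_ids = critical[:n_critical] + high[:n_high] + low[:n_low]
--     return sample_ids
-- ===== SOURCE B (Python) =====
-- def select_balanced_sample(gt_data: dict, n_critical: int = 3, n_high: int = 2, n_low: int = 5) -> list:
--     """Select balanced sample from ground truth."""
--     items = list(gt_data.get("restaurants", {}).items())
--
--     def verdict(data):
--         return data.get("ground_truth", {}).get("verdict", "Low Risk")
--
--     def pick(match, limit):
--         return [biz_id for biz_id, data in items if match(verdict(data))][:limit]
--
--     return (pick(lambda v: v == "Critical Risk", n_critical)
--             + pick(lambda v: v == "High Risk", n_high)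
--             + pick(lambda v: v not in ("Critical Risk", "High Risk"), n_low))
-- ===== Notes on version B (the rewrite author's own statement) =====
-- stated objective: alternative
-- what changed: Replaced A's single pass that accumulates three mutable bucket lists and then slices each with three independent filter-comprehension+slice passes over the items, one per risk level, concatenated directly.
import Mathlib
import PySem

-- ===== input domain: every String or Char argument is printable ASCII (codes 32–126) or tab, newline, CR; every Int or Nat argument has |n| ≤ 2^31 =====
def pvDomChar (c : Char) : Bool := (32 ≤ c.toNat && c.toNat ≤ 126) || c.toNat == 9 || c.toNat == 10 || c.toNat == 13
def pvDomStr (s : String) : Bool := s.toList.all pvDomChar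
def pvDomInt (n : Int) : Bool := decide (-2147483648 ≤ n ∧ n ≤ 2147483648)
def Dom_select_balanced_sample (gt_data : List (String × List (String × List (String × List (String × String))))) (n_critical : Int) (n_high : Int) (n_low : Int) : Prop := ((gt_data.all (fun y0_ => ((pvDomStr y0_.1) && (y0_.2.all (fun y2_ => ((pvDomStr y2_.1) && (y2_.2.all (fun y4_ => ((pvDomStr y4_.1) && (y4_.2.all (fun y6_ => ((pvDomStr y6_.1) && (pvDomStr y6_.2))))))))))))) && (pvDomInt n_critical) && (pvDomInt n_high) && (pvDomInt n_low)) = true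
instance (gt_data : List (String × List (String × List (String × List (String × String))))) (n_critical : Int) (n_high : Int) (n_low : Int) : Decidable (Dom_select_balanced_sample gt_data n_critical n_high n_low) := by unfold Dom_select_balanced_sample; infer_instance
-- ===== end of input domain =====

-- B replaces A's one-pass triple-accumulator with three independent filter+slice passes (objective: alternative decomposition, same cost).
-- ===== PORT A =====
-- dict.get(k, dflt) on an insertion-order association list: first match.
def pvGetD {a : Type} (d : List (String × a)) (k : String) (dflt : a) : a :=
  match d with
  | [] => dflt
  | (k', v) :: rest => if k' == k then v else pvGetD rest k dflt

-- data.get("ground_truth", {}).get("verdict", "Low Risk") — identical in both Pythons.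
def pvVerdict (data : List (String × List (String × String))) : String :=
  pvGetD (pvGetD data "ground_truth" []) "verdict" "Low Risk"

def select_balanced_sample (gt_data : List (String × List (String × List (String × List (String × String))))) (n_critical : Int) (n_high : Int) (n_low : Int) : List String :=
  let acc := (pvGetD gt_data "restaurants" []).foldl
    (fun (acc : List String × List String × List String) item =>
      let verdict := pvVerdict item.2
      if verdict == "Critical Risk" then (acc.1 ++ [item.1], acc.2.1, acc.2.2)
      else if verdict == "High Risk" then (acc.1, acc.2.1 ++ [item.1], acc.2.2)
      else (acc.1, acc.2.1, acc.2.2 ++ [item.1])) ([], [], [])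
  PySem.List.slice acc.1 none (some n_critical)
    ++ PySem.List.slice acc.2.1 none (some n_high)
    ++ PySem.List.slice acc.2.2 none (some n_low)

-- ===== PORT B =====
def pvPick (items : List (String × List (String × List (String × String)))) (matchV : String → Bool) (limit : Int) : List String :=
  PySem.List.slice ((items.filter (fun p => matchV (pvVerdict p.2))).map Prod.fst) none (some limit)

def select_balanced_sample_alt (gt_data : List (String × List (String × List (String × List (String × String))))) (n_critical : Int) (n_high : Int) (n_low : Int) : List String :=
  let items := pvGetD gt_data "restaurants" []
  pvPick items (fun v => v == "Critical Risk") n_critical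
    ++ pvPick items (fun v => v == "High Risk") n_high
    ++ pvPick items (fun v => !(v == "Critical Risk") && !(v == "High Risk")) n_low

-- ===== PRECONDITION & SPEC =====
def Spec_select_balanced_sample (gt_data : List (String × List (String × List (String × List (String × String))))) (n_critical : Int) (n_high : Int) (n_low : Int) (out : List String) : Prop := out = select_balanced_sample_alt gt_data n_critical n_high n_low
instance (gt_data : List (String × List (String × List (String × List (String × String))))) (n_critical : Int) (n_high : Int) (n_low : Int) (out : List String) : Decidable (Spec_select_balanced_sample gt_data n_critical n_high n_low out) := by unfold Spec_select_balanced_sample; infer_instance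

-- ===== CLAIM =====
def Claim_equal_select_balanced_sample : Prop := ∀ (gt_data : List (String × List (String × List (String × List (String × String))))) (n_critical : Int) (n_high : Int) (n_low : Int), Dom_select_balanced_sample gt_data n_critical n_high n_low → Spec_select_balanced_sample gt_data n_critical n_high n_low (select_balanced_sample gt_data n_critical n_high n_low)

-- ===== LEMMAS AND PROOFS =====
-- The triple accumulated by A's single fold is exactly the three filtered projections B computes.
theorem pv_fold_eq_filters (items : List (String × List (String × List (String × String))))
    (c h l : List String) :
    items.foldl
      (fun (acc : List String × List String × List String) item =>
        let verdict := pvVerdict item.2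
        if verdict == "Critical Risk" then (acc.1 ++ [item.1], acc.2.1, acc.2.2)
        else if verdict == "High Risk" then (acc.1, acc.2.1 ++ [item.1], acc.2.2)
        else (acc.1, acc.2.1, acc.2.2 ++ [item.1])) (c, h, l)
    = (c ++ (items.filter (fun p => pvVerdict p.2 == "Critical Risk")).map Prod.fst,
       h ++ (items.filter (fun p => pvVerdict p.2 == "High Risk")).map Prod.fst,
       l ++ (items.filter (fun p => !(pvVerdict p.2 == "Critical Risk") && !(pvVerdict p.2 == "High Risk"))).map Prod.fst) := by
  induction items generalizing c h l with
  | nil => simp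
  | cons x xs ih =>
    simp only [List.foldl_cons, List.filter_cons]
    by_cases h1 : pvVerdict x.2 == "Critical Risk" <;>
      by_cases h2 : pvVerdict x.2 == "High Risk" <;>
        · show List.foldl _ _ xs = _
          rw [ih]
          simp_all

-- ===== VERDICT =====
theorem select_balanced_sample_spec : Claim_equal_select_balanced_sample := by
  intro gt_data n_critical n_high n_low _
  unfold Spec_select_balanced_sample select_balanced_sample select_balanced_sample_alt pvPick
  rw [pv_fold_eq_filters]
  simp
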